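-- pv_equiv track=rewrite | github.com/jorul/ITGK | ITGK øvinger/Aud2/3.py | isTautonym
-- ===== SOURCE A (Python) =====
-- def isTautonym(ord):
--     splittet = ord.split(' ')
--     if len(splittet) <2:
--         return False
--     antall_like = 0
--     for i in range(len(splittet)):
--         if splittet[i].lower() == splittet[1].lower():
--             antall_like += 1
--     if antall_like == len(splittet):
--         return True
--     return False
-- ===== SOURCE B (Python) =====
-- def isTautonym(ord):
--     splittet = ord.split(' ')
--     if len(splittet) < 2:
--         return False
--     return len({w.lower() for w in splittet}) == 1
-- ===== Notes on version B (the rewrite author's own statement) =====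
-- stated objective: idiomatic
-- what changed: Replaces the index loop that counts words equal to splittet[1].lower() (and compares the count to the total) with building the set of lowercased words and testing that it has exactly one element; no index-1 reference or match counter remains.
import Mathlib
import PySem

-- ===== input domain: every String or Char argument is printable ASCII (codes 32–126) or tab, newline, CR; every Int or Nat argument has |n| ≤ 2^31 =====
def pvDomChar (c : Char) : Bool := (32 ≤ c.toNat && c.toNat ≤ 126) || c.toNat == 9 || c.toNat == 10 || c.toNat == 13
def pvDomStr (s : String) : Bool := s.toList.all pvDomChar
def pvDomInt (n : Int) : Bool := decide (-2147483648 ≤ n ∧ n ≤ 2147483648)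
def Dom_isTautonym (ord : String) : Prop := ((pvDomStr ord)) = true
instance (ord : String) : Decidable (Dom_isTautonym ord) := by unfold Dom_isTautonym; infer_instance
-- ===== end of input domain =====

-- B replaces A's "count the words matching splittet[1].lower() and compare the count to the total"
-- loop with "the set of lowercased words has exactly one element" (idiomatic; same O(n) cost).


-- ===== PORT A =====
-- splittet = ord.split(' '); index loop counting words whose lower() equals splittet[1].lower();
-- True iff that count equals len(splittet). sep " " ≠ "" so split? is always some.
def isTautonym (ord : String) : Bool :=
  let splittet := (PySem.Str.split? ord " ").getD []
  if PySem.List.len splittet < 2 then false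
  else
    let antall_like : Int :=
      (PySem.List.pyRange 0 (PySem.List.len splittet)).foldl
        (fun acc i =>
          if PySem.Str.lower (PySem.List.pyGetD splittet i "") ==
             PySem.Str.lower (PySem.List.pyGetD splittet 1 "") then acc + 1 else acc) 0
    if antall_like == PySem.List.len splittet then true else false

-- ===== PORT B =====
-- splittet = ord.split(' '); False if fewer than two words, else the set of lowercased words is a singleton
def isTautonym_alt (ord : String) : Bool :=
  let splittet := (PySem.Str.split? ord " ").getD []
  if PySem.List.len splittet < 2 then false
  else (PySem.Set.ofList (splittet.map PySem.Str.lower)).length == 1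

-- ===== PRECONDITION & SPEC =====
def Spec_isTautonym (ord : String) (out : Bool) : Prop := out = isTautonym_alt ord
instance (ord : String) (out : Bool) : Decidable (Spec_isTautonym ord out) := by unfold Spec_isTautonym; infer_instance

-- ===== CLAIM (what is proved, stated in full; the proofs are below) =====
def Claim_equal_isTautonym : Prop := ∀ (ord : String), Dom_isTautonym ord → Spec_isTautonym ord (isTautonym ord)

-- ===== LEMMAS AND PROOFS =====

-- a list containing a has a one-element distinct-set iff every element equals a
lemma set_ofList_len_one_iff {α : Type} [BEq α] [LawfulBEq α] (l : List α) (a : α) (ha : a ∈ l) :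
    (PySem.Set.ofList l).length = 1 ↔ ∀ y ∈ l, y = a := by
  constructor
  · intro h y hy
    obtain ⟨b, hb⟩ := List.length_eq_one_iff.mp h
    have hyb : y ∈ PySem.Set.ofList l := (PySem.Set.mem_ofList l y).mpr hy
    have hab : a ∈ PySem.Set.ofList l := (PySem.Set.mem_ofList l a).mpr ha
    rw [hb] at hyb hab
    simp at hyb hab
    rw [hyb, hab]
  · intro h
    have hmem : a ∈ PySem.Set.ofList l := (PySem.Set.mem_ofList l a).mpr ha
    have hall : ∀ y ∈ PySem.Set.ofList l, y = a := fun y hy =>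
      h y ((PySem.Set.mem_ofList l y).mp hy)
    have hnd := PySem.Set.nodup_ofList l
    match hS : PySem.Set.ofList l with
    | [] => rw [hS] at hmem; simp at hmem
    | [x] => rfl
    | x :: y :: rest =>
      rw [hS] at hall hnd
      have hx := hall x (by simp)
      have hy := hall y (by simp)
      rw [List.nodup_cons] at hnd
      exact absurd (by simp [hx, hy] : x ∈ y :: rest) hnd.1

-- ===== VERDICT (by name: the statement is the Claim_ definition above) =====
theorem isTautonym_spec : Claim_equal_isTautonym := by
  intro ord _
  unfold Spec_isTautonym isTautonym isTautonym_alt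
  set w := (PySem.Str.split? ord " ").getD [] with hw
  by_cases hlen : w.length ≤ 1
  · simp [PySem.List.len, hlen]
  · have h2 : ¬ (PySem.List.len w < 2) := by simp [PySem.List.len]; omega
    rw [if_neg h2, if_neg h2,
        PySem.List.foldl_pyRange_zero_pyGetD w ""
          (f := fun acc x => if PySem.Str.lower x == PySem.Str.lower (PySem.List.pyGetD w 1 "") then acc + 1 else acc) 0,
        PySem.List.foldl_count_if]
    have h1 : 1 < w.length := by omega
    have hmem : PySem.Str.lower (PySem.List.pyGetD w 1 "") ∈ w.map PySem.Str.lower := by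
      rw [PySem.List.pyGetD_ofNat' w 1 "", List.getD_eq_getElem w "" h1]
      exact List.mem_map_of_mem (List.getElem_mem h1)
    have key : (List.countP (fun x => PySem.Str.lower x == PySem.Str.lower (PySem.List.pyGetD w 1 "")) w = w.length)
        ↔ ((PySem.Set.ofList (w.map PySem.Str.lower)).length = 1) := by
      rw [List.countP_eq_length, set_ofList_len_one_iff _ _ hmem]
      constructor
      · intro h y hy
        obtain ⟨x, hx, rfl⟩ := List.mem_map.mp hy
        simpa using h x hx
      · intro h x hx
        simpa using h _ (List.mem_map_of_mem hx)
    simp only [PySem.List.len, zero_add]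
    by_cases hc : List.countP (fun x => PySem.Str.lower x == PySem.Str.lower (PySem.List.pyGetD w 1 "")) w = w.length
    · simp [hc, key.mp hc]
    · have hci : ¬ ((↑(List.countP (fun x => PySem.Str.lower x == PySem.Str.lower (PySem.List.pyGetD w 1 "")) w) : Int) = ↑w.length) := by
        exact_mod_cast hc
      simp [hci]
      exact fun h => hc (key.mpr h)
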